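-- pv_equiv track=rewrite | github.com/sleepyMS/programmers_solution | 전력망을 둘로 나누기.py | dfs
-- ===== SOURCE A (Python) =====
-- def dfs(graph, n, start):
--     stack = [start]
--     visited = set([start])
--     while stack:
--         tmp = stack.pop()
--         for i in graph[tmp]:
--             if i not in visited:
--                 stack.append(i)
--                 visited.add(i)
--
--     return abs(len(visited) - (n - len(visited)))
-- ===== SOURCE B (Python) =====
-- def dfs(graph, n, start):
--     seen = {start}
--     frontier = [start]
--     while frontier:
--         nxt = []
--         for v in frontier:
--             for i in graph[v]:
--                 if i not in seen:
--                     seen.add(i)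
--                     nxt.append(i)
--         frontier = nxt
--     return abs(2 * len(seen) - n)
-- ===== Notes on version B (the rewrite author's own statement) =====
-- stated objective: alternative
-- what changed: Replaces the LIFO-stack depth-first traversal by a level-synchronous breadth-first traversal (whole frontier expanded into a fresh next-level list each round) and returns the closed form abs(2*len(seen)-n) instead of abs(len-(n-len)); both visit exactly the reachable component, so the returned value is identical.
-- outside the precondition, e.g. on dfs({0: [], 1: [2]}, 2, 0): A returns 0, B returns 0
import Mathlib
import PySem

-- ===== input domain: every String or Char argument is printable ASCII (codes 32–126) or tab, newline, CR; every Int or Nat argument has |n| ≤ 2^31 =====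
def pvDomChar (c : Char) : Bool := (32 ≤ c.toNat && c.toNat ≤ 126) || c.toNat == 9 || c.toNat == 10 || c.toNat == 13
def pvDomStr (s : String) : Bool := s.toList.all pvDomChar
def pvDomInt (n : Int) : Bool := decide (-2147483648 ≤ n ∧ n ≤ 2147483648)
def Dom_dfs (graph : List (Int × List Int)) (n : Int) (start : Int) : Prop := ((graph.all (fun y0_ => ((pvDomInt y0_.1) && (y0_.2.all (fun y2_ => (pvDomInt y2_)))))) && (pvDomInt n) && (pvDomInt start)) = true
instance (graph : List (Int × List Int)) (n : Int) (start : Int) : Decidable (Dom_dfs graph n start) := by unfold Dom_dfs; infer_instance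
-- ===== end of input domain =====

-- B replaces A's LIFO-stack DFS by a level-synchronous BFS (frontier lists) with the
-- closed form abs(2*len(seen)-n); same reachable component, same return value.

-- ===== PORT A =====
-- graph is a Python dict: graph[x] is first-match lookup (none = KeyError)
def dfsLook (g : List (Int × List Int)) (k : Int) : Option (List Int) :=
  (PySem.Dict.mk g).get? k

-- the while-loop of A: pop a node, push its unseen neighbours; fuel only makes the
-- recursion structural (it is proved sufficient under Pre_dfs)
def dfsLoop (g : List (Int × List Int)) : Nat → List Int → PySem.Set Int → Option (PySem.Set Int)
  | 0, _, _ => none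
  | _ + 1, [], visited => some visited
  | fuel + 1, tmp :: rest, visited =>
    match dfsLook g tmp with
    | none => none
    | some ns =>
      let sv := ns.foldl
        (fun (sv : List Int × PySem.Set Int) i =>
          if i ∈ sv.2 then sv else (i :: sv.1, PySem.Set.add sv.2 i))
        (rest, visited)
      dfsLoop g fuel sv.1 sv.2

def dfs (graph : List (Int × List Int)) (n : Int) (start : Int) : Int :=
  match dfsLoop graph ((start :: graph.flatMap (fun p => p.2)).length + 1)
      [start] (PySem.Set.ofList [start]) with
  | some visited => |(visited.length : Int) - (n - (visited.length : Int))|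
  | none => 0  -- KeyError path, excluded by Pre_dfs

-- ===== PORT B =====
-- one BFS round: expand every node of the frontier, appending unseen neighbours to nxt
def bfsInner (g : List (Int × List Int)) (frontier : List Int)
    (nxt0 : List Int) (seen0 : PySem.Set Int) : Option (List Int × PySem.Set Int) :=
  frontier.foldl
    (fun acc v =>
      match acc with
      | none => none
      | some sv =>
        match dfsLook g v with
        | none => none
        | some ns =>
          some (ns.foldl
            (fun (a : List Int × PySem.Set Int) i =>
              if i ∈ a.2 then a else (a.1 ++ [i], PySem.Set.add a.2 i)) sv))
    (some (nxt0, seen0))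

def bfsLoop (g : List (Int × List Int)) : Nat → List Int → PySem.Set Int → Option (PySem.Set Int)
  | 0, _, _ => none
  | _ + 1, [], seen => some seen
  | fuel + 1, v :: fr, seen =>
    match bfsInner g (v :: fr) [] seen with
    | none => none
    | some sv => bfsLoop g fuel sv.1 sv.2

def dfs_alt (graph : List (Int × List Int)) (n : Int) (start : Int) : Int :=
  match bfsLoop graph ((start :: graph.flatMap (fun p => p.2)).length + 1)
      [start] (PySem.Set.ofList [start]) with
  | some seen => |2 * (seen.length : Int) - n|
  | none => 0  -- KeyError path, excluded by Pre_dfs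

-- ===== PRECONDITION & SPEC =====
-- Pre_dfs: the graph is a well-formed adjacency dict (start and every listed neighbour
-- are keys).  A raises KeyError exactly when it pops a node that is not a key; Pre_dfs
-- conservatively also excludes malformed graphs whose missing nodes are unreachable,
-- on which A (and B) still return.
def Pre_dfs (graph : List (Int × List Int)) (n : Int) (start : Int) : Prop :=
  start ∈ graph.map Prod.fst ∧ ∀ p ∈ graph, ∀ v ∈ p.2, v ∈ graph.map Prod.fst
instance (graph : List (Int × List Int)) (n : Int) (start : Int) : Decidable (Pre_dfs graph n start) := by unfold Pre_dfs; infer_instance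

def pvWitness_dfs : (List (Int × List Int)) × Int × Int := ([(0, [1]), (1, [0]), (2, [])], 3, 0)

def Spec_dfs (graph : List (Int × List Int)) (n : Int) (start : Int) (out : Int) : Prop := out = dfs_alt graph n start
instance (graph : List (Int × List Int)) (n : Int) (start : Int) (out : Int) : Decidable (Spec_dfs graph n start out) := by unfold Spec_dfs; infer_instance

-- ===== CLAIM (what is proved, stated in full; the proofs are below) =====
def Claim_equal_dfs : Prop := ∀ (graph : List (Int × List Int)) (n : Int) (start : Int), Dom_dfs graph n start → Pre_dfs graph n start → Spec_dfs graph n start (dfs graph n start)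

-- ===== LEMMAS AND PROOFS =====

-- the universe of node values the traversals can ever see, and the unseen count
def pvU (g : List (Int × List Int)) (start : Int) : Finset Int :=
  (start :: g.flatMap (fun p => p.2)).toFinset

def pvGap (g : List (Int × List Int)) (start : Int) (v : List Int) : Nat :=
  (pvU g start \ v.toFinset).card

-- nodes reachable from start
inductive pvReach (g : List (Int × List Int)) (start : Int) : Int → Prop
  | base : pvReach g start start
  | step {x y : Int} {ns : List Int} :
      pvReach g start x → dfsLook g x = some ns → y ∈ ns → pvReach g start y

def pvClosed (g : List (Int × List Int)) (V : List Int) : Prop :=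
  ∀ x ∈ V, ∀ ns, dfsLook g x = some ns → ∀ y ∈ ns, y ∈ V

lemma pvReach_subset {g : List (Int × List Int)} {start : Int} {V : List Int}
    (hs : start ∈ V) (hc : pvClosed g V) : ∀ x, pvReach g start x → x ∈ V := by
  intro x hx
  induction hx with
  | base => exact hs
  | step hr hl hm ih => exact hc _ ih _ hl _ hm

lemma dfsLook_mem {g : List (Int × List Int)} {k : Int} {ns : List Int}
    (h : dfsLook g k = some ns) : (k, ns) ∈ g := by
  have := PySem.Dict.mem_items_of_get?_eq_some (d := PySem.Dict.mk g) h
  simpa [PySem.Dict.items] using this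

lemma dfsLook_isSome {g : List (Int × List Int)} {k : Int}
    (h : k ∈ g.map Prod.fst) : ∃ ns, dfsLook g k = some ns := by
  rcases ho : dfsLook g k with _ | ns
  · exact absurd ((PySem.Dict.get?_eq_none_iff_not_mem_keys _ _).1 ho) (by simpa [PySem.Dict.keys] using h)
  · exact ⟨ns, rfl⟩

-- generic one-node expansion fold (A pushes with cons, B with append)
lemma foldStep (push : List Int → Int → List Int)
    (hmem : ∀ s i x, x ∈ push s i ↔ x ∈ s ∨ x = i)
    (ns s0 : List Int) (v0 : PySem.Set Int) :
    let r := ns.foldl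
      (fun (sv : List Int × PySem.Set Int) i =>
        if i ∈ sv.2 then sv else (push sv.1 i, PySem.Set.add sv.2 i)) (s0, v0)
    (∀ x ∈ v0, x ∈ r.2) ∧
    (∀ x ∈ r.2, x ∈ v0 ∨ x ∈ ns) ∧
    (∀ i ∈ ns, i ∈ r.2) ∧
    (∀ x ∈ r.1, x ∈ s0 ∨ x ∈ ns) ∧
    (∀ x ∈ s0, x ∈ r.1) ∧
    (∀ x ∈ r.2, x ∉ v0 → x ∈ r.1) ∧
    (v0.Nodup → r.2.Nodup) := by
  induction ns generalizing s0 v0 with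
  | nil =>
    exact ⟨fun x hx => hx, fun x hx => Or.inl hx, by simp, fun x hx => Or.inl hx,
           fun x hx => hx, fun x hx hnx => absurd hx hnx, fun h => h⟩
  | cons i ns ih =>
    simp only [List.foldl_cons]
    by_cases hi : i ∈ v0
    · simp only [if_pos hi]
      obtain ⟨f1, f2, f3, f4, f5, f6, f7⟩ := ih s0 v0
      refine ⟨f1, fun x hx => (f2 x hx).imp id (List.mem_cons_of_mem _),
              fun j hj => ?_, fun x hx => (f4 x hx).imp id (List.mem_cons_of_mem _),
              f5, f6, f7⟩
      rcases List.mem_cons.1 hj with rfl | hj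
      · exact f1 _ hi
      · exact f3 _ hj
    · simp only [if_neg hi]
      obtain ⟨f1, f2, f3, f4, f5, f6, f7⟩ := ih (push s0 i) (PySem.Set.add v0 i)
      refine ⟨fun x hx => f1 x ((PySem.Set.mem_add _ _ _).2 (Or.inl hx)), fun x hx => ?_,
              fun j hj => ?_, fun x hx => ?_,
              fun x hx => f5 x ((hmem s0 i x).2 (Or.inl hx)), fun x hx hnx => ?_,
              fun h => f7 (PySem.Set.nodup_add v0 i h)⟩
      · rcases f2 x hx with hx' | hx'
        · rcases (PySem.Set.mem_add _ _ _).1 hx' with h' | rfl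
          · exact Or.inl h'
          · exact Or.inr (List.mem_cons_self ..)
        · exact Or.inr (List.mem_cons_of_mem _ hx')
      · rcases List.mem_cons.1 hj with rfl | hj
        · exact f1 _ ((PySem.Set.mem_add _ _ _).2 (Or.inr rfl))
        · exact f3 _ hj
      · rcases f4 x hx with hx' | hx'
        · rcases (hmem s0 i x).1 hx' with h' | rfl
          · exact Or.inl h'
          · exact Or.inr (List.mem_cons_self ..)
        · exact Or.inr (List.mem_cons_of_mem _ hx')
      · by_cases hx' : x ∈ PySem.Set.add v0 i
        · rcases (PySem.Set.mem_add _ _ _).1 hx' with h' | rfl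
          · exact absurd h' hnx
          · exact f5 _ ((hmem s0 x x).2 (Or.inr rfl))
        · exact f6 x hx hx'

lemma foldStep_count (push : List Int → Int → List Int)
    (hlen : ∀ s i, (push s i).length = s.length + 1)
    (U : Finset Int) (ns : List Int) (hU : ∀ i ∈ ns, i ∈ U)
    (s0 : List Int) (v0 : PySem.Set Int) :
    let r := ns.foldl
      (fun (sv : List Int × PySem.Set Int) i =>
        if i ∈ sv.2 then sv else (push sv.1 i, PySem.Set.add sv.2 i)) (s0, v0)
    (U \ r.2.toFinset).card + r.1.length ≤ (U \ v0.toFinset).card + s0.length := by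
  induction ns generalizing s0 v0 with
  | nil => exact le_rfl
  | cons i ns ih =>
    simp only [List.foldl_cons]
    by_cases hi : i ∈ v0
    · simpa [if_pos hi] using ih (fun j hj => hU j (List.mem_cons_of_mem _ hj)) s0 v0
    · simp only [if_neg hi]
      have hiU : i ∈ U := hU i (List.mem_cons_self ..)
      have hmem : i ∈ U \ v0.toFinset := Finset.mem_sdiff.2 ⟨hiU, by simpa using hi⟩
      have hpos : 0 < (U \ v0.toFinset).card := Finset.card_pos.2 ⟨i, hmem⟩
      have hfin : (PySem.Set.add v0 i).toFinset = insert i v0.toFinset := by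
        simp [PySem.Set.add_of_not_mem hi, List.toFinset_append]
      have hcard : (U \ (PySem.Set.add v0 i).toFinset).card = (U \ v0.toFinset).card - 1 := by
        rw [hfin, Finset.sdiff_insert, Finset.card_erase_of_mem hmem]
      have := ih (fun j hj => hU j (List.mem_cons_of_mem _ hj)) (push s0 i) (PySem.Set.add v0 i)
      rw [hcard, hlen] at this
      omega

-- the two instantiations (A pushes with cons, B with append)
lemma foldStepA (ns s0 : List Int) (v0 : PySem.Set Int) :
    let r := ns.foldl
      (fun (sv : List Int × PySem.Set Int) i =>
        if i ∈ sv.2 then sv else (i :: sv.1, PySem.Set.add sv.2 i)) (s0, v0)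
    (∀ x ∈ v0, x ∈ r.2) ∧
    (∀ x ∈ r.2, x ∈ v0 ∨ x ∈ ns) ∧
    (∀ i ∈ ns, i ∈ r.2) ∧
    (∀ x ∈ r.1, x ∈ s0 ∨ x ∈ ns) ∧
    (∀ x ∈ s0, x ∈ r.1) ∧
    (∀ x ∈ r.2, x ∉ v0 → x ∈ r.1) ∧
    (v0.Nodup → r.2.Nodup) :=
  foldStep (fun s i => i :: s) (by simp [or_comm]) ns s0 v0

lemma foldStepA_count (U : Finset Int) (ns : List Int) (hU : ∀ i ∈ ns, i ∈ U)
    (s0 : List Int) (v0 : PySem.Set Int) :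
    let r := ns.foldl
      (fun (sv : List Int × PySem.Set Int) i =>
        if i ∈ sv.2 then sv else (i :: sv.1, PySem.Set.add sv.2 i)) (s0, v0)
    (U \ r.2.toFinset).card + r.1.length ≤ (U \ v0.toFinset).card + s0.length :=
  foldStep_count (fun s i => i :: s) (by simp) U ns hU s0 v0

lemma foldStepB (ns s0 : List Int) (v0 : PySem.Set Int) :
    let r := ns.foldl
      (fun (a : List Int × PySem.Set Int) i =>
        if i ∈ a.2 then a else (a.1 ++ [i], PySem.Set.add a.2 i)) (s0, v0)
    (∀ x ∈ v0, x ∈ r.2) ∧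
    (∀ x ∈ r.2, x ∈ v0 ∨ x ∈ ns) ∧
    (∀ i ∈ ns, i ∈ r.2) ∧
    (∀ x ∈ r.1, x ∈ s0 ∨ x ∈ ns) ∧
    (∀ x ∈ s0, x ∈ r.1) ∧
    (∀ x ∈ r.2, x ∉ v0 → x ∈ r.1) ∧
    (v0.Nodup → r.2.Nodup) :=
  foldStep (fun s i => s ++ [i]) (by simp) ns s0 v0

lemma foldStepB_count (U : Finset Int) (ns : List Int) (hU : ∀ i ∈ ns, i ∈ U)
    (s0 : List Int) (v0 : PySem.Set Int) :
    let r := ns.foldl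
      (fun (a : List Int × PySem.Set Int) i =>
        if i ∈ a.2 then a else (a.1 ++ [i], PySem.Set.add a.2 i)) (s0, v0)
    (U \ r.2.toFinset).card + r.1.length ≤ (U \ v0.toFinset).card + s0.length :=
  foldStep_count (fun s i => s ++ [i]) (by simp) U ns hU s0 v0

lemma dfsLoop_sound (g : List (Int × List Int)) (start : Int) :
    ∀ (fuel : Nat) (stack : List Int) (visited : PySem.Set Int) (V : PySem.Set Int),
    (∀ x ∈ stack, x ∈ visited) →
    (∀ x ∈ visited, pvReach g start x) →
    (∀ x ∈ visited, x ∉ stack → ∀ ns, dfsLook g x = some ns → ∀ y ∈ ns, y ∈ visited) →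
    visited.Nodup →
    dfsLoop g fuel stack visited = some V →
    (∀ x ∈ visited, x ∈ V) ∧ (∀ x ∈ V, pvReach g start x) ∧ pvClosed g V ∧ V.Nodup := by
  intro fuel
  induction fuel with
  | zero => intro stack visited V _ _ _ _ h; simp [dfsLoop] at h
  | succ fuel ih =>
    intro stack visited V hsv hreach hcl hnd hrun
    cases stack with
    | nil =>
      simp only [dfsLoop, Option.some.injEq] at hrun
      subst hrun
      exact ⟨fun x hx => hx, hreach,
             fun x hx ns hl y hy => hcl x hx (by simp) ns hl y hy, hnd⟩
    | cons tmp rest =>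
      cases hlook : dfsLook g tmp with
      | none => simp [dfsLoop, hlook] at hrun
      | some ns =>
        simp only [dfsLoop, hlook] at hrun
        obtain ⟨f1, f2, f3, f4, f5, f6, f7⟩ := foldStepA ns rest visited
        have htmp : tmp ∈ visited := hsv tmp (List.mem_cons_self ..)
        have hreach' : ∀ x ∈ (ns.foldl
            (fun (sv : List Int × PySem.Set Int) i =>
              if i ∈ sv.2 then sv else (i :: sv.1, PySem.Set.add sv.2 i)) (rest, visited)).2,
            pvReach g start x := by
          intro x hx
          rcases f2 x hx with hx' | hx'
          · exact hreach x hx'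
          · exact pvReach.step (hreach tmp htmp) hlook hx'
        have hsv' : ∀ x ∈ (ns.foldl
            (fun (sv : List Int × PySem.Set Int) i =>
              if i ∈ sv.2 then sv else (i :: sv.1, PySem.Set.add sv.2 i)) (rest, visited)).1,
            x ∈ (ns.foldl
            (fun (sv : List Int × PySem.Set Int) i =>
              if i ∈ sv.2 then sv else (i :: sv.1, PySem.Set.add sv.2 i)) (rest, visited)).2 := by
          intro x hx
          rcases f4 x hx with hx' | hx'
          · exact f1 x (hsv x (List.mem_cons_of_mem _ hx'))
          · exact f3 x hx'
        have hcl' : ∀ x ∈ (ns.foldl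
            (fun (sv : List Int × PySem.Set Int) i =>
              if i ∈ sv.2 then sv else (i :: sv.1, PySem.Set.add sv.2 i)) (rest, visited)).2,
            x ∉ (ns.foldl
            (fun (sv : List Int × PySem.Set Int) i =>
              if i ∈ sv.2 then sv else (i :: sv.1, PySem.Set.add sv.2 i)) (rest, visited)).1 →
            ∀ ns', dfsLook g x = some ns' → ∀ y ∈ ns', y ∈ (ns.foldl
            (fun (sv : List Int × PySem.Set Int) i =>
              if i ∈ sv.2 then sv else (i :: sv.1, PySem.Set.add sv.2 i)) (rest, visited)).2 := by
          intro x hx hnx ns' hl' y hy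
          by_cases hxv : x ∈ visited
          · by_cases hxs : x ∈ tmp :: rest
            · rcases List.mem_cons.1 hxs with rfl | hxr
              · rw [hlook] at hl'
                injection hl' with h; subst h
                exact f3 y hy
              · exact absurd (f5 x hxr) hnx
            · exact f1 y (hcl x hxv hxs ns' hl' y hy)
          · exact absurd (f6 x hx hxv) hnx
        obtain ⟨c1, c2, c3, c4⟩ := ih _ _ V hsv' hreach' hcl' (f7 hnd) hrun
        exact ⟨fun x hx => c1 x (f1 x hx), c2, c3, c4⟩

lemma dfsLoop_term (g : List (Int × List Int)) (start : Int)
    (hpre : ∀ p ∈ g, ∀ v ∈ p.2, v ∈ g.map Prod.fst) :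
    ∀ (fuel : Nat) (stack : List Int) (visited : PySem.Set Int),
    (∀ x ∈ stack, x ∈ g.map Prod.fst) →
    pvGap g start visited + stack.length + 1 ≤ fuel →
    ∃ V, dfsLoop g fuel stack visited = some V := by
  intro fuel
  induction fuel with
  | zero => intro stack visited _ hf; omega
  | succ fuel ih =>
    intro stack visited hk hf
    cases stack with
    | nil => exact ⟨visited, by simp [dfsLoop]⟩
    | cons tmp rest =>
      obtain ⟨ns, hlook⟩ := dfsLook_isSome (hk tmp (List.mem_cons_self ..))
      have hmemg := dfsLook_mem hlook
      have hnsU : ∀ i ∈ ns, i ∈ pvU g start := by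
        intro i hi
        simp only [pvU, List.mem_toFinset, List.mem_cons, List.mem_flatMap]
        exact Or.inr ⟨(tmp, ns), hmemg, hi⟩
      have hcount := foldStepA_count (pvU g start) ns hnsU rest visited
      obtain ⟨f1, f2, f3, f4, f5, f6, f7⟩ := foldStepA ns rest visited
      have hk' : ∀ x ∈ (ns.foldl
          (fun (sv : List Int × PySem.Set Int) i =>
            if i ∈ sv.2 then sv else (i :: sv.1, PySem.Set.add sv.2 i)) (rest, visited)).1,
          x ∈ g.map Prod.fst := by
        intro x hx
        rcases f4 x hx with hx' | hx'
        · exact hk x (List.mem_cons_of_mem _ hx')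
        · exact hpre _ hmemg x hx'
      obtain ⟨V, hV⟩ := ih (ns.foldl
          (fun (sv : List Int × PySem.Set Int) i =>
            if i ∈ sv.2 then sv else (i :: sv.1, PySem.Set.add sv.2 i)) (rest, visited)).1
        (ns.foldl
          (fun (sv : List Int × PySem.Set Int) i =>
            if i ∈ sv.2 then sv else (i :: sv.1, PySem.Set.add sv.2 i)) (rest, visited)).2
        hk' (by
        simp only [pvGap] at *
        simp only [List.length_cons] at hf
        omega)
      exact ⟨V, by simp only [dfsLoop, hlook]; exact hV⟩

lemma bfsInner_none (g : List (Int × List Int)) (frontier : List Int) :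
    frontier.foldl
      (fun acc v =>
        match acc with
        | none => none
        | some sv =>
          match dfsLook g v with
          | none => none
          | some ns =>
            some (ns.foldl
              (fun (a : List Int × PySem.Set Int) i =>
                if i ∈ a.2 then a else (a.1 ++ [i], PySem.Set.add a.2 i)) sv))
      (none : Option (List Int × PySem.Set Int)) = none := by
  induction frontier with
  | nil => rfl
  | cons v fr ih => exact ih

lemma bfsInner_sound (g : List (Int × List Int)) :
    ∀ (frontier nxt0 : List Int) (seen0 : PySem.Set Int) (nxt : List Int) (seen' : PySem.Set Int),
    bfsInner g frontier nxt0 seen0 = some (nxt, seen') →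
    (∀ x ∈ seen0, x ∈ seen') ∧
    (∀ x ∈ seen', x ∈ seen0 ∨ ∃ v ∈ frontier, ∃ ns, dfsLook g v = some ns ∧ x ∈ ns) ∧
    (∀ v ∈ frontier, ∀ ns, dfsLook g v = some ns → ∀ y ∈ ns, y ∈ seen') ∧
    (∀ x ∈ nxt, x ∈ nxt0 ∨ ∃ v ∈ frontier, ∃ ns, dfsLook g v = some ns ∧ x ∈ ns) ∧
    (∀ x ∈ nxt, x ∈ nxt0 ∨ x ∈ seen') ∧
    (∀ x ∈ seen', x ∉ seen0 → x ∈ nxt) ∧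
    (∀ x ∈ nxt0, x ∈ nxt) ∧
    (seen0.Nodup → seen'.Nodup) := by
  intro frontier
  induction frontier with
  | nil =>
    intro nxt0 seen0 nxt seen' hrun
    simp only [bfsInner, List.foldl_nil, Option.some.injEq, Prod.mk.injEq] at hrun
    obtain ⟨rfl, rfl⟩ := hrun
    exact ⟨fun x hx => hx, fun x hx => Or.inl hx, by simp, fun x hx => Or.inl hx,
           fun x hx => Or.inl hx, fun x hx hnx => absurd hx hnx, fun x hx => hx, fun h => h⟩
  | cons v fr ih =>
    intro nxt0 seen0 nxt seen' hrun
    cases hlook : dfsLook g v with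
    | none =>
      simp only [bfsInner, List.foldl_cons, hlook] at hrun
      rw [bfsInner_none] at hrun
      cases hrun
    | some ns =>
      simp only [bfsInner, List.foldl_cons, hlook] at hrun
      obtain ⟨f1, f2, f3, f4, f5, f6, f7⟩ := foldStepB ns nxt0 seen0
      have hrun' : bfsInner g fr (ns.foldl
            (fun (a : List Int × PySem.Set Int) i =>
              if i ∈ a.2 then a else (a.1 ++ [i], PySem.Set.add a.2 i)) (nxt0, seen0)).1 (ns.foldl
            (fun (a : List Int × PySem.Set Int) i =>
              if i ∈ a.2 then a else (a.1 ++ [i], PySem.Set.add a.2 i)) (nxt0, seen0)).2 = some (nxt, seen') := hrun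
      obtain ⟨s1, s2, s3, s4, s5, s6, s7, s8⟩ := ih _ _ _ _ hrun'
      refine ⟨fun x hx => s1 _ (f1 x hx), ?_, ?_, ?_, ?_, ?_,
              fun x hx => s7 _ (f5 x hx), fun h => s8 (f7 h)⟩
      · intro x hx
        rcases s2 x hx with hx' | ⟨v', hv', ns', hl', hx'⟩
        · rcases f2 x hx' with h | h
          · exact Or.inl h
          · exact Or.inr ⟨v, List.mem_cons_self .., ns, hlook, h⟩
        · exact Or.inr ⟨v', List.mem_cons_of_mem _ hv', ns', hl', hx'⟩
      · intro v' hv' ns' hl' y hy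
        rcases List.mem_cons.1 hv' with rfl | hv'
        · rw [hlook] at hl'
          injection hl' with h; subst h
          exact s1 _ (f3 y hy)
        · exact s3 v' hv' ns' hl' y hy
      · intro x hx
        rcases s4 x hx with hx' | ⟨v', hv', ns', hl', hx'⟩
        · rcases f4 x hx' with h | h
          · exact Or.inl h
          · exact Or.inr ⟨v, List.mem_cons_self .., ns, hlook, h⟩
        · exact Or.inr ⟨v', List.mem_cons_of_mem _ hv', ns', hl', hx'⟩
      · intro x hx
        rcases s5 x hx with hx' | hx'
        · rcases f4 x hx' with h | h
          · exact Or.inl h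
          · exact Or.inr (s1 _ (f3 x h))
        · exact Or.inr hx'
      · intro x hx hnx
        by_cases hx2 : x ∈ (ns.foldl
            (fun (a : List Int × PySem.Set Int) i =>
              if i ∈ a.2 then a else (a.1 ++ [i], PySem.Set.add a.2 i)) (nxt0, seen0)).2
        · exact s7 _ (f6 x hx2 hnx)
        · exact s6 x hx hx2

lemma bfsInner_term (g : List (Int × List Int)) :
    ∀ (frontier : List Int), (∀ v ∈ frontier, v ∈ g.map Prod.fst) →
    ∀ (nxt0 : List Int) (seen0 : PySem.Set Int),
    ∃ sv, bfsInner g frontier nxt0 seen0 = some sv := by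
  intro frontier
  induction frontier with
  | nil => intro _ nxt0 seen0; exact ⟨(nxt0, seen0), rfl⟩
  | cons v fr ih =>
    intro hk nxt0 seen0
    obtain ⟨ns, hlook⟩ := dfsLook_isSome (hk v (List.mem_cons_self ..))
    obtain ⟨sv, hsv⟩ := ih (fun x hx => hk x (List.mem_cons_of_mem _ hx)) (ns.foldl
            (fun (a : List Int × PySem.Set Int) i =>
              if i ∈ a.2 then a else (a.1 ++ [i], PySem.Set.add a.2 i)) (nxt0, seen0)).1 (ns.foldl
            (fun (a : List Int × PySem.Set Int) i =>
              if i ∈ a.2 then a else (a.1 ++ [i], PySem.Set.add a.2 i)) (nxt0, seen0)).2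
    exact ⟨sv, by simp only [bfsInner, List.foldl_cons, hlook]; exact hsv⟩

lemma bfsInner_count (g : List (Int × List Int)) (start : Int) :
    ∀ (frontier nxt0 : List Int) (seen0 : PySem.Set Int) (nxt : List Int) (seen' : PySem.Set Int),
    bfsInner g frontier nxt0 seen0 = some (nxt, seen') →
    pvGap g start seen' + nxt.length ≤ pvGap g start seen0 + nxt0.length := by
  intro frontier
  induction frontier with
  | nil =>
    intro nxt0 seen0 nxt seen' hrun
    simp only [bfsInner, List.foldl_nil, Option.some.injEq, Prod.mk.injEq] at hrun
    obtain ⟨rfl, rfl⟩ := hrun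
    exact le_rfl
  | cons v fr ih =>
    intro nxt0 seen0 nxt seen' hrun
    cases hlook : dfsLook g v with
    | none =>
      simp only [bfsInner, List.foldl_cons, hlook] at hrun
      rw [bfsInner_none] at hrun
      cases hrun
    | some ns =>
      simp only [bfsInner, List.foldl_cons, hlook] at hrun
      have hnsU : ∀ i ∈ ns, i ∈ pvU g start := by
        intro i hi
        simp only [pvU, List.mem_toFinset, List.mem_cons, List.mem_flatMap]
        exact Or.inr ⟨(v, ns), dfsLook_mem hlook, hi⟩
      have hcount := foldStepB_count (pvU g start) ns hnsU nxt0 seen0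
      have hrun' : bfsInner g fr (ns.foldl
            (fun (a : List Int × PySem.Set Int) i =>
              if i ∈ a.2 then a else (a.1 ++ [i], PySem.Set.add a.2 i)) (nxt0, seen0)).1 (ns.foldl
            (fun (a : List Int × PySem.Set Int) i =>
              if i ∈ a.2 then a else (a.1 ++ [i], PySem.Set.add a.2 i)) (nxt0, seen0)).2 = some (nxt, seen') := hrun
      have hrec := ih (ns.foldl
            (fun (a : List Int × PySem.Set Int) i =>
              if i ∈ a.2 then a else (a.1 ++ [i], PySem.Set.add a.2 i)) (nxt0, seen0)).1 (ns.foldl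
            (fun (a : List Int × PySem.Set Int) i =>
              if i ∈ a.2 then a else (a.1 ++ [i], PySem.Set.add a.2 i)) (nxt0, seen0)).2 nxt seen' hrun'
      simp only [pvGap] at *
      omega

lemma bfsLoop_sound (g : List (Int × List Int)) (start : Int) :
    ∀ (fuel : Nat) (frontier : List Int) (seen : PySem.Set Int) (V : PySem.Set Int),
    (∀ x ∈ frontier, x ∈ seen) →
    (∀ x ∈ seen, pvReach g start x) →
    (∀ x ∈ seen, x ∉ frontier → ∀ ns, dfsLook g x = some ns → ∀ y ∈ ns, y ∈ seen) →
    seen.Nodup →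
    bfsLoop g fuel frontier seen = some V →
    (∀ x ∈ seen, x ∈ V) ∧ (∀ x ∈ V, pvReach g start x) ∧ pvClosed g V ∧ V.Nodup := by
  intro fuel
  induction fuel with
  | zero => intro frontier seen V _ _ _ _ h; simp [bfsLoop] at h
  | succ fuel ih =>
    intro frontier seen V hfs hreach hcl hnd hrun
    cases frontier with
    | nil =>
      simp only [bfsLoop, Option.some.injEq] at hrun
      subst hrun
      exact ⟨fun x hx => hx, hreach,
             fun x hx ns hl y hy => hcl x hx (by simp) ns hl y hy, hnd⟩
    | cons v fr =>
      cases hinner : bfsInner g (v :: fr) [] seen with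
      | none => simp [bfsLoop, hinner] at hrun
      | some sv =>
        simp only [bfsLoop, hinner] at hrun
        obtain ⟨nxt, seen'⟩ := sv
        obtain ⟨s1, s2, s3, s4, s5, s6, s7, s8⟩ := bfsInner_sound g (v :: fr) [] seen nxt seen' hinner
        have hfs' : ∀ x ∈ nxt, x ∈ seen' := fun x hx => (s5 x hx).resolve_left (by simp)
        have hreach' : ∀ x ∈ seen', pvReach g start x := by
          intro x hx
          rcases s2 x hx with h | ⟨v', hv', ns', hl', hx'⟩
          · exact hreach x h
          · exact pvReach.step (hreach v' (hfs v' hv')) hl' hx'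
        have hcl' : ∀ x ∈ seen', x ∉ nxt → ∀ ns', dfsLook g x = some ns' → ∀ y ∈ ns', y ∈ seen' := by
          intro x hx hnx ns' hl' y hy
          by_cases hxs : x ∈ seen
          · by_cases hxf : x ∈ v :: fr
            · exact s3 x hxf ns' hl' y hy
            · exact s1 _ (hcl x hxs hxf ns' hl' y hy)
          · exact absurd (s6 x hx hxs) hnx
        obtain ⟨c1, c2, c3, c4⟩ := ih nxt seen' V hfs' hreach' hcl' (s8 hnd) hrun
        exact ⟨fun x hx => c1 x (s1 x hx), c2, c3, c4⟩

lemma bfsLoop_term (g : List (Int × List Int)) (start : Int)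
    (hpre : ∀ p ∈ g, ∀ v ∈ p.2, v ∈ g.map Prod.fst) :
    ∀ (fuel : Nat) (frontier : List Int) (seen : PySem.Set Int),
    (∀ x ∈ frontier, x ∈ g.map Prod.fst) →
    pvGap g start seen + 2 ≤ fuel →
    ∃ V, bfsLoop g fuel frontier seen = some V := by
  intro fuel
  induction fuel with
  | zero => intro frontier seen _ hf; omega
  | succ fuel ih =>
    intro frontier seen hk hf
    cases frontier with
    | nil => exact ⟨seen, by simp [bfsLoop]⟩
    | cons v fr =>
      obtain ⟨sv, hinner⟩ := bfsInner_term g (v :: fr) hk [] seen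
      obtain ⟨nxt, seen'⟩ := sv
      have hcount := bfsInner_count g start (v :: fr) [] seen nxt seen' hinner
      obtain ⟨s1, s2, s3, s4, s5, s6, s7, s8⟩ := bfsInner_sound g (v :: fr) [] seen nxt seen' hinner
      have hk' : ∀ x ∈ nxt, x ∈ g.map Prod.fst := by
        intro x hx
        rcases s4 x hx with h | ⟨v', hv', ns', hl', hx'⟩
        · simp at h
        · exact hpre _ (dfsLook_mem hl') x hx'
      cases nxt with
      | nil =>
        refine ⟨seen', ?_⟩
        have h1 : bfsLoop g fuel [] seen' = some seen' := by
          cases fuel with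
          | zero => omega
          | succ fuel' => simp [bfsLoop]
        simp only [bfsLoop, hinner]
        exact h1
      | cons w ws =>
        have hle : pvGap g start seen' + 2 ≤ fuel := by
          simp only [pvGap, List.length_nil, List.length_cons] at hcount hf ⊢
          omega
        obtain ⟨V, hV⟩ := ih (w :: ws) seen' hk' hle
        exact ⟨V, by simp only [bfsLoop, hinner]; exact hV⟩

-- ===== VERDICT (by name: the statement is the Claim_ definition above) =====
theorem dfs_spec : Claim_equal_dfs := by
  intro graph n start _ hpre
  obtain ⟨hstart, hpre2⟩ := hpre
  unfold Spec_dfs dfs dfs_alt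
  have hofl : PySem.Set.ofList [start] = [start] := PySem.Set.ofList_eq_self_of_nodup _ (List.nodup_singleton _)
  have hUcard : (pvU graph start).card ≤ (start :: graph.flatMap (fun p => p.2)).length :=
    List.toFinset_card_le _
  have hstartU : start ∈ pvU graph start := by simp [pvU]
  have hpos : 0 < (pvU graph start).card := Finset.card_pos.2 ⟨start, hstartU⟩
  have hgap : pvGap graph start (PySem.Set.ofList [start]) = (pvU graph start).card - 1 := by
    have hsub : ({start} : Finset Int) ⊆ pvU graph start := Finset.singleton_subset_iff.2 hstartU
    simp only [pvGap, hofl]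
    rw [show (List.toFinset [start]) = ({start} : Finset Int) by simp, Finset.card_sdiff,
        Finset.inter_eq_left.2 hsub, Finset.card_singleton]
  have hk0 : ∀ x ∈ [start], x ∈ graph.map Prod.fst := by
    intro x hx; rw [List.mem_singleton] at hx; subst hx; exact hstart
  have hstack0 : ∀ x ∈ [start], x ∈ PySem.Set.ofList [start] := by rw [hofl]; exact fun x hx => hx
  have hreach0 : ∀ x ∈ PySem.Set.ofList [start], pvReach graph start x := by
    rw [hofl]; intro x hx; rw [List.mem_singleton] at hx; subst hx; exact pvReach.base
  have hcl0 : ∀ x ∈ PySem.Set.ofList [start], x ∉ [start] →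
      ∀ ns, dfsLook graph x = some ns → ∀ y ∈ ns, y ∈ PySem.Set.ofList [start] := by
    rw [hofl]; intro x hx hnx; exact absurd hx hnx
  have hnd0 : (PySem.Set.ofList [start]).Nodup := PySem.Set.nodup_ofList _
  obtain ⟨V, hV⟩ := dfsLoop_term graph start hpre2
    ((start :: graph.flatMap (fun p => p.2)).length + 1) [start] (PySem.Set.ofList [start])
    hk0 (by simp only [List.length_singleton]; omega)
  obtain ⟨a1, a2, a3, a4⟩ := dfsLoop_sound graph start _ _ _ V hstack0 hreach0 hcl0 hnd0 hV
  obtain ⟨W, hW⟩ := bfsLoop_term graph start hpre2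
    ((start :: graph.flatMap (fun p => p.2)).length + 1) [start] (PySem.Set.ofList [start])
    hk0 (by omega)
  obtain ⟨b1, b2, b3, b4⟩ := bfsLoop_sound graph start _ _ _ W hstack0 hreach0 hcl0 hnd0 hW
  have hsV : start ∈ V := a1 start (by rw [hofl]; exact List.mem_singleton.2 rfl)
  have hsW : start ∈ W := b1 start (by rw [hofl]; exact List.mem_singleton.2 rfl)
  have hiff : ∀ x, x ∈ V ↔ x ∈ W := fun x =>
    ⟨fun h => pvReach_subset hsW b3 x (a2 x h), fun h => pvReach_subset hsV a3 x (b2 x h)⟩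
  have hlen : V.length = W.length := ((List.perm_ext_iff_of_nodup a4 b4).2 hiff).length_eq
  simp only [hV, hW]
  rw [hlen]
  congr 1
  ring
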